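-- pv_equiv track=rewrite | github.com/BenGreenleaf/L203 | loading_bay.py | block_found
-- ===== SOURCE A (Python) =====
-- side_threshold = 255
--
-- def block_found(data):
--     gap_threshold = 5
--     valids_threshold = 3
--     gap = 0
--     valids = 0
--     recent_data = data[-15:] if len(data) >= 15 else data
--     for d in recent_data:
--         if d <= side_threshold and gap <= gap_threshold:
--             valids += 1
--             gap = 0
--         elif d <= side_threshold and gap > gap_threshold:
--             valids = 1
--             gap = 0
--         else:
--             gap += 1
--
--     if valids >= valids_threshold:
--         return True
--     else:
--         return False
-- ===== SOURCE B (Python) =====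
-- from itertools import groupby
--
-- side_threshold = 255
--
-- def block_found(data):
--     recent = data[-15:]
--     gap = 0
--     valids = 0
--     for is_valid, grp in groupby(recent, key=lambda d: d <= side_threshold):
--         n = sum(1 for _ in grp)
--         if is_valid:
--             valids = n if gap > 5 else valids + n
--             gap = 0
--         else:
--             gap += n
--     return valids >= 3
-- ===== Notes on version B (the rewrite author's own statement) =====
-- stated objective: alternative
-- what changed: B first run-length encodes the bounded slice into (is_valid, length) runs via itertools.groupby and then folds over whole runs (adding run lengths to valids/gap at once), instead of A's per-element loop with a three-way branch.
import Mathlib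
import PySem

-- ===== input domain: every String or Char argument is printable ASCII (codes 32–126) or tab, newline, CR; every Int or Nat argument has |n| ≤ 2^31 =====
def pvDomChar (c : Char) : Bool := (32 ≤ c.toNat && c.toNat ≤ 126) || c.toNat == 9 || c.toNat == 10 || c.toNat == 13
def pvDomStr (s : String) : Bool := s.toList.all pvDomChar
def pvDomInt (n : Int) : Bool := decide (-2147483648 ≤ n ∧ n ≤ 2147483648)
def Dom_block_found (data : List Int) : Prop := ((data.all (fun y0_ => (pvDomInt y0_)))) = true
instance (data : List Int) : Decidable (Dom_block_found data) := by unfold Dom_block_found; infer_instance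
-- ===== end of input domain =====

-- B builds a run-length-encoded view (groupby) and folds over runs instead of elements; same cost, different decomposition.

-- ===== PORT A =====
-- per-element loop body of A
def bfStepA (st : Int × Int) (d : Int) : Int × Int :=
  if d ≤ 255 ∧ st.1 ≤ 5 then (0, st.2 + 1)
  else if d ≤ 255 ∧ st.1 > 5 then (0, 1)
  else (st.1 + 1, st.2)

def block_found (data : List Int) : Bool :=
  let recent := if (data.length : Int) ≥ 15 then PySem.List.slice data (some (-15)) none else data
  let st := recent.foldl bfStepA (0, 0)
  decide (st.2 ≥ 3)

-- ===== PORT B =====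
-- itertools.groupby on a list of Bools, as (value, run length) pairs
def bfRleGo (b : Bool) (n : Int) : List Bool → List (Bool × Int)
  | [] => [(b, n)]
  | c :: rest => if c = b then bfRleGo b (n + 1) rest else (b, n) :: bfRleGo c 1 rest

def bfRle : List Bool → List (Bool × Int)
  | [] => []
  | b :: rest => bfRleGo b 1 rest

-- per-run loop body of B
def bfRunStep (st : Int × Int) (run : Bool × Int) : Int × Int :=
  if run.1 then (0, if st.1 > 5 then run.2 else st.2 + run.2) else (st.1 + run.2, st.2)

def block_found_alt (data : List Int) : Bool :=
  let recent := PySem.List.slice data (some (-15)) none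
  let runs := bfRle (recent.map (fun d => decide (d ≤ 255)))
  let st := runs.foldl bfRunStep (0, 0)
  decide (st.2 ≥ 3)

-- ===== PRECONDITION & SPEC =====
def Spec_block_found (data : List Int) (out : Bool) : Prop := out = block_found_alt data
instance (data : List Int) (out : Bool) : Decidable (Spec_block_found data out) := by unfold Spec_block_found; infer_instance

-- ===== CLAIM (what is proved, stated in full; the proofs are below) =====
def Claim_equal_block_found : Prop := ∀ (data : List Int), Dom_block_found data → Spec_block_found data (block_found data)

-- ===== LEMMAS AND PROOFS =====

-- B's per-element step on the classified Bool
def bfStepB (st : Int × Int) (b : Bool) : Int × Int :=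
  if b then (if st.1 ≤ 5 then (0, st.2 + 1) else (0, 1)) else (st.1 + 1, st.2)

theorem bfStepA_eq (st : Int × Int) (d : Int) :
    bfStepA st d = bfStepB st (decide (d ≤ 255)) := by
  unfold bfStepA bfStepB
  by_cases h : d ≤ 255 <;> by_cases h2 : st.1 ≤ 5 <;> simp [h, h2] <;> omega

theorem bfStepB_runStep_succ (st : Int × Int) (b : Bool) (n : Int) :
    bfStepB (bfRunStep st (b, n)) b = bfRunStep st (b, n + 1) := by
  rcases st with ⟨g, v⟩
  unfold bfStepB bfRunStep
  cases b <;> split_ifs <;> simp_all [Prod.ext_iff] <;> omega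

theorem bfStepB_eq_runStep_one (st : Int × Int) (b : Bool) :
    bfStepB st b = bfRunStep st (b, 1) := by
  rcases st with ⟨g, v⟩
  unfold bfStepB bfRunStep
  cases b <;> split_ifs <;> simp_all [Prod.ext_iff] <;> omega

theorem bfRleGo_foldl (rest : List Bool) : ∀ (b : Bool) (n : Int) (st : Int × Int),
    (bfRleGo b n rest).foldl bfRunStep st = rest.foldl bfStepB (bfRunStep st (b, n)) := by
  induction rest with
  | nil => intro b n st; simp [bfRleGo]
  | cons c t ih =>
    intro b n st
    by_cases h : c = b
    · subst h
      simp [bfRleGo, ih, bfStepB_runStep_succ]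
    · simp [bfRleGo, h, List.foldl_cons, ih, bfStepB_eq_runStep_one]

theorem bfRle_foldl (bs : List Bool) (st : Int × Int) :
    (bfRle bs).foldl bfRunStep st = bs.foldl bfStepB st := by
  cases bs with
  | nil => rfl
  | cons b rest =>
    simp [bfRle, bfRleGo_foldl, bfStepB_eq_runStep_one]

theorem recent_eq (data : List Int) :
    (if (data.length : Int) ≥ 15 then PySem.List.slice data (some (-15)) none else data)
      = PySem.List.slice data (some (-15)) none := by
  split_ifs with h
  · rfl
  · rw [PySem.List.slice_some_none]
    have : PySem.List.clampIdx data.length (-15) = 0 := by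
      simp [PySem.List.clampIdx]
      omega
    simp [this]

-- ===== VERDICT (by name: the statement is the Claim_ definition above) =====
theorem block_found_spec : Claim_equal_block_found := by
  intro data _
  unfold Spec_block_found block_found block_found_alt
  rw [recent_eq]
  show decide ((List.foldl bfStepA (0, 0) (PySem.List.slice data (some (-15)) none)).2 ≥ 3)
      = decide ((List.foldl bfRunStep (0, 0)
          (bfRle ((PySem.List.slice data (some (-15)) none).map (fun d => decide (d ≤ 255))))).2 ≥ 3)
  rw [bfRle_foldl, List.foldl_map]
  simp only [← bfStepA_eq]
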